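-- pv_equiv track=rewrite | github.com/jonpecar/qrCodeImageSorter | qrImageIndexer/write_pdf_fpf2.py | sort_table_for_slicing
-- ===== SOURCE A (Python) =====
-- from typing import Dict, List, Tuple
-- from math import ceil
--
-- def sort_table_for_slicing(input_table : List[List], rows_per_page : int) -> List[List]:
--     '''
--         Function to sort table so that it will be in an order that will allow
--         easy sorting of QR code strips through the page. I.e. at the top of each
--         page will be QR code 1, 2, 3, 4 etc. instead of down the page, such that when
--         sliced into strips they will be in order when stacked.
--
--         Arguments:
--         input_table: List[List]: Table to be sorted. Expected that all rows same length and of at least length 1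
--         rows_per_page: int: Number of rows to be sorted for each page
--
--         Returns
--         List[List]: Sorted list of same number of elements as input sorted down the page
--     '''
--     total_rows = len(input_table)
--     page_count = ceil(total_rows/rows_per_page) # Need an extra full page if any remainder
--     output = []
--     for page in range(page_count):
--         for line in range(rows_per_page):
--             index = page + line * page_count
--             if index < total_rows:
--                 output.append(input_table[index])
--             else:
--                 output.append(['' for _ in input_table[0]])
--
--     return output
-- ===== SOURCE B (Python) =====
-- from math import ceil
--
-- def sort_table_for_slicing(input_table, rows_per_page):
--     total = len(input_table)
--     page_count = ceil(total / rows_per_page)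
--     width = len(input_table[0]) if input_table else 0
--     padded = list(input_table) + [['' for _ in range(width)]
--                                   for _ in range(page_count * rows_per_page - total)]
--     grid = [padded[i * page_count:(i + 1) * page_count] for i in range(rows_per_page)]
--     return [row for col in zip(*grid) for row in col]
-- ===== Notes on version B (the rewrite author's own statement) =====
-- stated objective: alternative
-- what changed: Instead of a double loop computing page+line*page_count indices and appending row by row, B pads the table to a full page grid, reshapes it into rows_per_page chunks of page_count rows, and returns the flattened transpose (zip(*grid)).
import Mathlib
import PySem

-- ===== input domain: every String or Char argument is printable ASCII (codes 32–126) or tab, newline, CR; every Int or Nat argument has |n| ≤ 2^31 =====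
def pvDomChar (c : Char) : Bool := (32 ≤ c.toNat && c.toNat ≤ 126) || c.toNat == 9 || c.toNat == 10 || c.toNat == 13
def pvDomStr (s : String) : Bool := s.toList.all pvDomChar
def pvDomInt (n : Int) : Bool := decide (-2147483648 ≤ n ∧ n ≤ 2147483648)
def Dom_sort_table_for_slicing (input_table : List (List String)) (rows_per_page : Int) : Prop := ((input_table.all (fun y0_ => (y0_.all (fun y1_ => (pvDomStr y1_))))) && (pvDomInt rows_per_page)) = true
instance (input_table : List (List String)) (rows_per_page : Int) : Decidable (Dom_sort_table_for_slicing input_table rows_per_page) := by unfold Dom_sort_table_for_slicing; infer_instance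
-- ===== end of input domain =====

-- B reorders the rows by pad-reshape-transpose instead of A's double loop over computed
-- indices; same results, same cost (objective: alternative).

-- ===== PORT A =====
-- math.ceil(total/r) on floats is exact on Dom (|values| ≤ 2^31): ported as -((-total) // r)
def sort_table_for_slicing (input_table : List (List String)) (rows_per_page : Int) : List (List String) :=
  let total_rows : Int := (input_table.length : Int)
  let page_count : Int := -(PySem.Int.floordiv (-total_rows) rows_per_page)
  (PySem.List.pyRange 0 page_count 1).foldl (fun output page =>
    (PySem.List.pyRange 0 rows_per_page 1).foldl (fun output line =>
      let index := page + line * page_count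
      if index < total_rows then
        output ++ [PySem.List.pyGetD input_table index []]
      else
        -- input_table[0]: only reached when total_rows > 0, so the default [] is never used
        output ++ [(PySem.List.pyGetD input_table 0 []).map (fun _ => "")]
      ) output) []

-- ===== PORT B =====
-- ['' for _ in range(width)]
def pvEmptyRow (width : Int) : List String := (List.range width.toNat).map (fun _ => "")

-- zip(*rows): hand-ported (no PySem primitive); fuel = length of the first row bounds the
-- truncating zip exactly (it stops earlier as soon as some row is exhausted)
def pvZipStar (rows : List (List (List String))) : Nat → List (List (List String))
  | 0 => []
  | n+1 =>
    match rows.mapM List.head? with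
    | none => []
    | some heads => heads :: pvZipStar (rows.map List.tail) n

def sort_table_for_slicing_alt (input_table : List (List String)) (rows_per_page : Int) : List (List String) :=
  let total : Int := (input_table.length : Int)
  let page_count : Int := -(PySem.Int.floordiv (-total) rows_per_page)  -- math.ceil, exact on Dom
  let width : Int := if input_table.isEmpty then 0 else ((input_table.headD []).length : Int)
  let padded := input_table ++
    (List.range (page_count * rows_per_page - total).toNat).map (fun _ => pvEmptyRow width)
  let grid := (PySem.List.pyRange 0 rows_per_page 1).map (fun i =>
    PySem.List.slice padded (some (i * page_count)) (some ((i + 1) * page_count)))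
  (pvZipStar grid (grid.headD []).length).flatten

-- ===== PRECONDITION & SPEC =====
-- Pre_ excludes only rows_per_page = 0, where A raises ZeroDivisionError (B raises too).
def Pre_sort_table_for_slicing (input_table : List (List String)) (rows_per_page : Int) : Prop :=
  rows_per_page ≠ 0
instance (input_table : List (List String)) (rows_per_page : Int) : Decidable (Pre_sort_table_for_slicing input_table rows_per_page) := by unfold Pre_sort_table_for_slicing; infer_instance

def pvWitness_sort_table_for_slicing : List (List String) × Int := ([["a"], ["b"], ["c"]], 2)

def Spec_sort_table_for_slicing (input_table : List (List String)) (rows_per_page : Int) (out : List (List String)) : Prop := out = sort_table_for_slicing_alt input_table rows_per_page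
instance (input_table : List (List String)) (rows_per_page : Int) (out : List (List String)) : Decidable (Spec_sort_table_for_slicing input_table rows_per_page out) := by unfold Spec_sort_table_for_slicing; infer_instance

-- ===== CLAIM (what is proved, stated in full; the proofs are below) =====
def Claim_equal_sort_table_for_slicing : Prop := ∀ (input_table : List (List String)) (rows_per_page : Int), Dom_sort_table_for_slicing input_table rows_per_page → Pre_sort_table_for_slicing input_table rows_per_page → Spec_sort_table_for_slicing input_table rows_per_page (sort_table_for_slicing input_table rows_per_page)


-- ===== LEMMAS AND PROOFS =====

-- proof-only helpers: the ceiling page count, the padded table, and the canonical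
-- "page-major list of padded rows" both ports are shown to equal
def pvPC (T : Nat) (r : Int) : Int := -(PySem.Int.floordiv (-(T : Int)) r)

def pvPadded (tbl : List (List String)) (r : Int) : List (List String) :=
  tbl ++ (List.range ((pvPC tbl.length r).toNat * r.toNat - tbl.length)).map
    (fun _ => pvEmptyRow ((tbl.headD []).length : Int))

def pvCanon (P R : Nat) (padded : List (List String)) : List (List String) :=
  (List.range P).flatMap (fun page =>
    (List.range R).map (fun line => padded.getD (line * P + page) []))

lemma pvPC_bounds (T : Nat) (r : Int) (hr : 0 < r) :
    ((pvPC T r) - 1) * r < (T : Int) ∧ (T : Int) ≤ (pvPC T r) * r :=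
  (PySem.Int.neg_floordiv_neg_eq_iff_of_pos hr).mp rfl

lemma pvPC_nonneg (T : Nat) (r : Int) (hr : 0 < r) : 0 ≤ pvPC T r := by
  obtain ⟨h1, h2⟩ := pvPC_bounds T r hr
  nlinarith [Int.natCast_nonneg T]

lemma pvPC_nonpos (T : Nat) (r : Int) (hr : r < 0) : -(PySem.Int.floordiv (-(T : Int)) r) ≤ 0 := by
  have hm := PySem.Int.floordiv_mul_add_mod (-(T : Int)) r
  have hb := PySem.Int.mod_neg_bounds (a := -(T:Int)) hr
  nlinarith [Int.natCast_nonneg T]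

lemma pvGetD_tail (l : List (List String)) (j : Nat) :
    l.tail.getD j [] = l.getD (j + 1) [] := by
  simp [List.getD_eq_getElem?_getD, List.getElem?_tail]

lemma pvMapM_heads (rows : List (List (List String))) (h : ∀ l ∈ rows, l ≠ []) :
    rows.mapM List.head? = some (rows.map (fun l => l.getD 0 [])) := by
  induction rows with
  | nil => rfl
  | cons a t ih =>
    have ha : a ≠ [] := h a (by simp)
    obtain ⟨x, xs, rfl⟩ := List.exists_cons_of_ne_nil ha
    simp [List.mapM_cons, ih (fun l hl => h l (by simp [hl]))]

lemma pvZipStar_eq (P : Nat) (rows : List (List (List String))) (hne : rows ≠ [])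
    (h : ∀ l ∈ rows, l.length = P) :
    pvZipStar rows P = (List.range P).map (fun j => rows.map (fun l => l.getD j [])) := by
  induction P generalizing rows with
  | zero => simp [pvZipStar]
  | succ P ih =>
    have hnz : ∀ l ∈ rows, l ≠ [] := fun l hl => by
      have := h l hl; exact List.ne_nil_of_length_pos (by omega)
    rw [pvZipStar, pvMapM_heads rows hnz]
    rw [ih (rows.map List.tail) (by simpa using hne)
        (fun l hl => by
          obtain ⟨l', hl', rfl⟩ := List.mem_map.mp hl
          simp [List.length_tail, h l' hl'])]
    rw [List.range_succ_eq_map]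
    simp only [List.map_cons, List.map_map]
    congr 1
    apply List.map_congr_left
    intro j hj
    apply List.map_congr_left
    intro l hl
    exact pvGetD_tail l j

lemma pvA_eq (tbl : List (List String)) (r : Int) (hr : 0 < r) :
    sort_table_for_slicing tbl r
      = pvCanon (pvPC tbl.length r).toNat r.toNat (pvPadded tbl r) := by
  have hnn := pvPC_nonneg tbl.length r hr
  obtain ⟨h1, h2⟩ := pvPC_bounds tbl.length r hr
  have hid : -(PySem.Int.floordiv (-((tbl.length : Nat) : Int)) r) = pvPC tbl.length r := rfl
  set T := tbl.length with hT
  set pc := pvPC T r with hpc0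
  set P := pc.toNat with hP0
  set R := r.toNat with hR0
  have hpc : pc = (P : Int) := by omega
  have hrR : r = (R : Int) := by omega
  have hR : 0 < R := by omega
  have hTle : T ≤ P * R := by
    have : (T : Int) ≤ (P : Int) * (R : Int) := by rw [← hpc, ← hrR]; exact h2
    exact_mod_cast this
  -- inner loop = append of a mapped list
  have step1 : ∀ (page : Int) (acc : List (List String)),
      (PySem.List.pyRange 0 r 1).foldl (fun output line =>
        if page + line * pc < (T : Int) then
          output ++ [PySem.List.pyGetD tbl (page + line * pc) []]
        else
          output ++ [(PySem.List.pyGetD tbl 0 []).map (fun _ => "")]) acc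
      = acc ++ (PySem.List.pyRange 0 r 1).map (fun line =>
          if page + line * pc < (T : Int) then PySem.List.pyGetD tbl (page + line * pc) []
          else (PySem.List.pyGetD tbl 0 []).map (fun _ => "")) := by
    intro page acc
    rw [PySem.List.foldl_congr_mem _ _ (fun output line =>
      output ++ [if page + line * pc < (T : Int) then PySem.List.pyGetD tbl (page + line * pc) []
          else (PySem.List.pyGetD tbl 0 []).map (fun _ => "")]) acc
      (by intro acc x _; dsimp only; split <;> rfl)]
    exact PySem.List.foldl_append_singleton_eq_map ..
  simp only [sort_table_for_slicing, hid, ← hT]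
  rw [PySem.List.foldl_congr_mem _ _ (fun output page =>
      output ++ (PySem.List.pyRange 0 r 1).map (fun line =>
          if page + line * pc < (T : Int) then PySem.List.pyGetD tbl (page + line * pc) []
          else (PySem.List.pyGetD tbl 0 []).map (fun _ => ""))) []
      (by intro acc x _; exact step1 x acc)]
  rw [PySem.List.foldl_append_eq_flatMap]
  rw [PySem.List.pyRange_one 0 pc, PySem.List.pyRange_one 0 r]
  simp only [zero_add, Int.sub_zero, ← hP0, ← hR0, List.flatMap_map, List.map_map]
  rw [pvCanon, List.flatMap_def, List.flatMap_def]
  rw [List.nil_append]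
  congr 1
  apply List.map_congr_left
  intro page hpage
  have hpageP : page < P := List.mem_range.mp hpage
  apply List.map_congr_left
  intro line hline
  have hlineR : line < R := List.mem_range.mp hline
  simp only [Function.comp]
  have hidx : (page : Int) + (line : Int) * pc = ((line * P + page : Nat) : Int) := by
    rw [hpc]; push_cast; ring
  rw [hidx]
  set n := line * P + page with hn
  have hnPR : n < P * R := by
    have hmul : (line + 1) * P = line * P + P := by ring
    calc n < (line + 1) * P := by omega
    _ ≤ R * P := Nat.mul_le_mul_right P (by omega)
    _ = P * R := Nat.mul_comm R P
  by_cases hc : n < T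
  · rw [if_pos (by exact_mod_cast hc)]
    rw [PySem.List.pyGetD_natCast]
    rw [pvPadded, ← hT, ← hpc0, ← hP0, ← hR0]
    rw [List.getD_eq_getElem?_getD, List.getD_eq_getElem?_getD,
        List.getElem?_append_left (by omega)]
  · rw [if_neg (by exact_mod_cast hc)]
    -- T ≤ n, so the padded row is the fresh empty row; T > 0 since a page exists
    have hTpos : 0 < T := by
      by_contra h0
      have hT0 : T = 0 := by omega
      have : pc ≤ 0 := by nlinarith [hT0 ▸ h1]
      omega
    obtain ⟨x, rest, hx⟩ := List.exists_cons_of_ne_nil (List.ne_nil_of_length_pos (hT ▸ hTpos))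
    rw [pvPadded, ← hT, ← hpc0, ← hP0, ← hR0, List.getD_eq_getElem?_getD,
        List.getElem?_append_right (by omega)]
    rw [List.getElem?_map, List.getElem?_range (by omega)]
    simp only [Option.map_some, Option.getD_some]
    rw [hx]
    simp [pvEmptyRow, PySem.List.pyGetD_zero_cons, List.map_const']

lemma pvB_eq (tbl : List (List String)) (r : Int) (hr : 0 < r) :
    sort_table_for_slicing_alt tbl r
      = pvCanon (pvPC tbl.length r).toNat r.toNat (pvPadded tbl r) := by
  have hnn := pvPC_nonneg tbl.length r hr
  obtain ⟨h1, h2⟩ := pvPC_bounds tbl.length r hr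
  have hid : -(PySem.Int.floordiv (-((tbl.length : Nat) : Int)) r) = pvPC tbl.length r := rfl
  set T := tbl.length with hT
  set pc := pvPC T r with hpc0
  set P := pc.toNat with hP0
  set R := r.toNat with hR0
  have hpc : pc = (P : Int) := by omega
  have hrR : r = (R : Int) := by omega
  have hR : 0 < R := by omega
  have hTle : T ≤ P * R := by
    have : (T : Int) ≤ (P : Int) * (R : Int) := by rw [← hpc, ← hrR]; exact h2
    exact_mod_cast this
  -- width and padding count
  have hw : (if tbl.isEmpty then (0 : Int) else ((tbl.headD []).length : Int))
      = ((tbl.headD []).length : Int) := by cases tbl <;> simp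
  have hcnt : (pc * r - (T : Int)).toNat = P * R - T := by
    rw [hpc, hrR]; omega
  have hplen : (pvPadded tbl r).length = P * R := by
    simp only [pvPadded, ← hT, ← hpc0, ← hP0, ← hR0, List.length_append, List.length_map,
      List.length_range]
    omega
  set padded := pvPadded tbl r with hpad0
  have hpadeq : tbl ++ (List.range ((pc * r - (T : Int)).toNat)).map
      (fun _ => pvEmptyRow (if tbl.isEmpty then (0 : Int) else ((tbl.headD []).length : Int)))
      = padded := by
    rw [hw, hcnt, hpad0, pvPadded, ← hT, ← hpc0, ← hP0, ← hR0]
  simp only [sort_table_for_slicing_alt, hid, ← hT, hpadeq]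
  rw [PySem.List.pyRange_one 0 r]
  simp only [zero_add, Int.sub_zero, ← hR0, List.map_map, Function.comp_def]
  have hgrid : (List.range R).map (fun (i : Nat) =>
        PySem.List.slice padded (some ((i : Int) * pc)) (some (((i : Int) + 1) * pc)))
      = (List.range R).map (fun i => (padded.drop (i * P)).take P) := by
    apply List.map_congr_left
    intro i hi
    have e1 : ((i : Int) * pc) = ((i * P : Nat) : Int) := by rw [hpc]; push_cast; ring
    have e2 : (((i : Int) + 1) * pc) = ((i * P : Nat) : Int) + ((P : Nat) : Int) := by
      rw [hpc]; push_cast; ring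
    rw [e1, e2, PySem.List.slice_natCast_add]
  rw [hgrid]
  have hne : (List.range R).map (fun i => (padded.drop (i * P)).take P) ≠ [] := by
    simp [List.range_eq_nil]; omega
  have hlens : ∀ l ∈ (List.range R).map (fun i => (padded.drop (i * P)).take P),
      l.length = P := by
    intro l hl
    obtain ⟨i, hi, rfl⟩ := List.mem_map.mp hl
    have hiR := List.mem_range.mp hi
    have hmul : (i + 1) * P = i * P + P := by ring
    have hle : (i + 1) * P ≤ R * P := Nat.mul_le_mul_right P (by omega)
    have hc : P * R = R * P := Nat.mul_comm P R
    simp only [List.length_take, List.length_drop, hplen]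
    omega
  have hfuel : (((List.range R).map (fun i => (padded.drop (i * P)).take P)).headD []).length
      = P := by
    obtain ⟨R', hR'⟩ := Nat.exists_eq_succ_of_ne_zero (Nat.pos_iff_ne_zero.mp hR)
    have hle : P ≤ P * R := Nat.le_mul_of_pos_right P (by omega)
    rw [hR', List.range_succ_eq_map]
    simp [List.length_take, hplen]
    omega
  rw [hfuel, pvZipStar_eq P _ hne hlens]
  rw [pvCanon, List.flatMap_def]
  congr 1
  apply List.map_congr_left
  intro j hj
  have hjP := List.mem_range.mp hj
  rw [List.map_map]
  apply List.map_congr_left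
  intro i hi
  simp only [Function.comp]
  rw [List.getD_eq_getElem?_getD, List.getD_eq_getElem?_getD, List.getElem?_take,
    if_pos hjP, List.getElem?_drop]

lemma pvA_neg (tbl : List (List String)) (r : Int) (hr : r < 0) :
    sort_table_for_slicing tbl r = [] := by
  have h0 : PySem.List.pyRange 0 (-(PySem.Int.floordiv (-((tbl.length : Nat) : Int)) r)) 1 = [] :=
    PySem.List.pyRange_one_eq_nil (pvPC_nonpos tbl.length r hr)
  simp only [sort_table_for_slicing, h0, List.foldl_nil]

lemma pvB_neg (tbl : List (List String)) (r : Int) (hr : r < 0) :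
    sort_table_for_slicing_alt tbl r = [] := by
  have h0 : PySem.List.pyRange 0 r 1 = [] := PySem.List.pyRange_one_eq_nil (le_of_lt hr)
  simp only [sort_table_for_slicing_alt, h0, List.map_nil, List.headD_nil, List.length_nil]
  simp [pvZipStar]

-- ===== VERDICT (by name: the statement is the Claim_ definition above) =====
theorem sort_table_for_slicing_spec : Claim_equal_sort_table_for_slicing := by
  intro tbl r _ hpre
  unfold Spec_sort_table_for_slicing
  rcases lt_trichotomy r 0 with hr | hr | hr
  · rw [pvA_neg tbl r hr, pvB_neg tbl r hr]
  · exact absurd hr hpre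
  · rw [pvA_eq tbl r hr, pvB_eq tbl r hr]
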